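-- pv_equiv track=rewrite | github.com/Patipol-BKK/textrank-app | Notebooks/text_rank.py | create_keyword_indices
-- ===== SOURCE A (Python) =====
-- def create_keyword_indices(keywords, words_list):
--     keyword_indices = {}
--     for keyword in keywords:
--         if keyword in keyword_indices:
--             keyword_indices[keyword] += [i for i in range(len(words_list)) if words_list[i].lower() == keyword.lower()]
--         else:
--             keyword_indices[keyword] = [i for i in range(len(words_list)) if words_list[i].lower() == keyword.lower()]
--     return keyword_indices
-- ===== SOURCE B (Python) =====
-- def create_keyword_indices(keywords, words_list):
--     index = {}
--     for i, word in enumerate(words_list):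
--         index.setdefault(word.lower(), []).append(i)
--     keyword_indices = {}
--     for keyword in keywords:
--         matches = index.get(keyword.lower(), [])
--         if keyword in keyword_indices:
--             keyword_indices[keyword] += matches
--         else:
--             keyword_indices[keyword] = list(matches)
--     return keyword_indices
-- ===== Notes on version B (the rewrite author's own statement) =====
-- stated objective: faster
-- what changed: Replaces the per-keyword scan of the whole words list with a single pass building a lowercase-word->indices dictionary, then a constant-time lookup per keyword.
import Mathlib
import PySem

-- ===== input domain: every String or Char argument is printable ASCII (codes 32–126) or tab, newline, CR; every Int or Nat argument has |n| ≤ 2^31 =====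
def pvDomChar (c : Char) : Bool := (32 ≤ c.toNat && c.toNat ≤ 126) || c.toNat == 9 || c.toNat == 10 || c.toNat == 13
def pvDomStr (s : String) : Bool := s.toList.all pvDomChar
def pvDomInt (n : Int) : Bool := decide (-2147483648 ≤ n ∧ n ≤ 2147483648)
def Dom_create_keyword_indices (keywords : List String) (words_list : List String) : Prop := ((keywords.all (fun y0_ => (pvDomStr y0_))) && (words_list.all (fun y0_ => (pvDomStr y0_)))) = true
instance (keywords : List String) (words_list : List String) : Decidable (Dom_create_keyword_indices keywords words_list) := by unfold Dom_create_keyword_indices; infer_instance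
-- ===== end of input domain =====

-- B builds a lowercase-word→indices dictionary in one pass, then looks keywords up, instead of A's per-keyword scan of the whole words list.
-- ===== PORT A =====
def create_keyword_indices (keywords : List String) (words_list : List String) : List (String × List Int) :=
  (keywords.foldl (fun d keyword =>
      if d.contains keyword then
        d.insert keyword (d.getD keyword [] ++
          (PySem.List.pyRange 0 (words_list.length : Int) 1).filter
            (fun i => PySem.Str.lower (PySem.List.pyGetD words_list i "") == PySem.Str.lower keyword))
      else
        d.insert keyword
          ((PySem.List.pyRange 0 (words_list.length : Int) 1).filter
            (fun i => PySem.Str.lower (PySem.List.pyGetD words_list i "") == PySem.Str.lower keyword)))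
    PySem.Dict.empty).items

-- ===== PORT B =====
-- index.setdefault(w.lower(), []).append(i) is Dict.modify (lower w) [] (· ++ [i]) (exact: d[k] = d.get(k, []) + [i])
def create_keyword_indices_alt (keywords : List String) (words_list : List String) : List (String × List Int) :=
  let index : PySem.Dict String (List Int) :=
    (PySem.List.enumerate words_list 0).foldl
      (fun d p => d.modify (PySem.Str.lower p.2) [] (· ++ [p.1])) PySem.Dict.empty
  (keywords.foldl (fun d keyword =>
      let hits := index.getD (PySem.Str.lower keyword) []
      if d.contains keyword then d.insert keyword (d.getD keyword [] ++ hits)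
      else d.insert keyword hits)
    PySem.Dict.empty).items

-- ===== PRECONDITION & SPEC =====
def Spec_create_keyword_indices (keywords : List String) (words_list : List String) (out : List (String × List Int)) : Prop := out = create_keyword_indices_alt keywords words_list
instance (keywords : List String) (words_list : List String) (out : List (String × List Int)) : Decidable (Spec_create_keyword_indices keywords words_list out) := by unfold Spec_create_keyword_indices; infer_instance

-- ===== CLAIM (what is proved, stated in full; the proofs are below) =====
def Claim_equal_create_keyword_indices : Prop := ∀ (keywords : List String) (words_list : List String), Dom_create_keyword_indices keywords words_list → Spec_create_keyword_indices keywords words_list (create_keyword_indices keywords words_list)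

-- ===== LEMMAS AND PROOFS =====

-- ===== VERDICT (by name: the statement is the Claim_ definition above) =====
-- The index dictionary's entry at key c is exactly A's comprehension with c for keyword.lower()
lemma index_getD (words_list : List String) (c : String) :
    ((PySem.List.enumerate words_list 0).foldl
      (fun (d : PySem.Dict String (List Int)) p => d.modify (PySem.Str.lower p.2) [] (· ++ [p.1]))
      PySem.Dict.empty).getD c []
    = (PySem.List.pyRange 0 (words_list.length : Int) 1).filter
        (fun i => PySem.Str.lower (PySem.List.pyGetD words_list i "") == c) := by
  have h : (PySem.List.enumerate words_list 0).foldl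
      (fun (d : PySem.Dict String (List Int)) p => d.modify (PySem.Str.lower p.2) [] (· ++ [p.1]))
      PySem.Dict.empty
      = ((PySem.List.enumerate words_list 0).map (fun p => (PySem.Str.lower p.2, p.1))).foldl
      (fun (d : PySem.Dict String (List Int)) q => d.modify q.1 [] (· ++ [q.2]))
      PySem.Dict.empty := by
    rw [List.foldl_map]
  rw [h, PySem.Dict.getD_foldl_modify_append]
  have e := PySem.List.enumerate_eq_map_pyRange words_list ""
  simp only [PySem.List.len_eq] at e
  rw [e]
  simp [List.filter_map, List.map_map, Function.comp_def]

theorem create_keyword_indices_spec : Claim_equal_create_keyword_indices := by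
  intro keywords words_list _
  unfold Spec_create_keyword_indices
  unfold create_keyword_indices create_keyword_indices_alt
  congr 2
  funext d keyword
  rw [index_getD]
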